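-- pv_equiv track=rewrite | github.com/Feel1x/FinCatchTask | src/agent.py | calc_reward
-- ===== SOURCE A (Python) =====
-- from collections import Counter
--
-- def calc_reward(mlpOutput, agentAction):
--     # compare digit counts between mlpOutput and agentAction; reward: 10 (1 match), 20 (2 matches), 100 (3 matches)
--     mlp_digit = Counter(str(int(mlpOutput)))         # 313 -> Counter{'3': 2, '1': 1})
--     agent_digit = Counter(str(int(agentAction)))
--
--     match = 0
--     for i in agent_digit:
--         if i in mlp_digit:
--             match += min(mlp_digit[i], agent_digit[i])
--
--     if match == 1:
--         return 10
--     if match == 2: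
--         return 20
--     if match == 3:
--         return 100
--     return 0
-- ===== SOURCE B (Python) =====
-- def calc_reward(mlpOutput, agentAction):
--     # sort the digit strings and count shared characters with a two-pointer merge
--     s1 = sorted(str(int(mlpOutput)))
--     s2 = sorted(str(int(agentAction)))
--     i = j = match = 0
--     while i < len(s1) and j < len(s2):
--         if s1[i] == s2[j]:
--             match += 1
--             i += 1
--             j += 1
--         elif s1[i] < s2[j]:
--             i += 1
--         else:
--             j += 1
--     if match == 1:
--         return 10
--     if match == 2:
--         return 20
--     if match == 3:
--         return 100
--     return 0
-- ===== Notes on version B (the rewrite author's own statement) =====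
-- stated objective: alternative
-- what changed: Counter-based multiset intersection replaced by sorting both digit strings and counting matches with a two-pointer merge (no hash maps maintained).
import Mathlib
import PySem

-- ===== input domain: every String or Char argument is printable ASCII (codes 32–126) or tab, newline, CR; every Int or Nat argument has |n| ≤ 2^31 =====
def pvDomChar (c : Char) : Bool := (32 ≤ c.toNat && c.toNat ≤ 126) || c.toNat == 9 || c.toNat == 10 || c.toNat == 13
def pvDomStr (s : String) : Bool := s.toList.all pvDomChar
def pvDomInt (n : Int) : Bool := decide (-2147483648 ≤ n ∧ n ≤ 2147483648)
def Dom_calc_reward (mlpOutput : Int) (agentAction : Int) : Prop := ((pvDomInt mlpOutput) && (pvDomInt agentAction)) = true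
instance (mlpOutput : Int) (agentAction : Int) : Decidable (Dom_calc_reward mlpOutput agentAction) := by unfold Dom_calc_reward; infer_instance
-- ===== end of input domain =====

-- B replaces A's Counter-based intersection with a sorted two-pointer merge; alternative algorithm, same cost class.

-- ===== PORT A =====
def calc_reward (mlpOutput : Int) (agentAction : Int) : Int :=
  let mlp_digit : PySem.Dict Char Int := PySem.Dict.counter (PySem.Int.toStr mlpOutput).toList
  let agent_digit : PySem.Dict Char Int := PySem.Dict.counter (PySem.Int.toStr agentAction).toList
  let mtch : Int := agent_digit.keys.foldl
    (fun acc i => if mlp_digit.contains i then acc + min (mlp_digit.getD i 0) (agent_digit.getD i 0) else acc) 0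
  if mtch = 1 then 10
  else if mtch = 2 then 20
  else if mtch = 3 then 100
  else 0

-- ===== PORT B =====
-- the two-pointer while loop of Source B, as recursion on the two (sorted) lists
def pvMergeCount : List Char → List Char → Int
  | [], _ => 0
  | _ :: _, [] => 0
  | a :: s1, b :: s2 =>
    if a = b then 1 + pvMergeCount s1 s2
    else if a < b then pvMergeCount s1 (b :: s2)
    else pvMergeCount (a :: s1) s2
termination_by s1 s2 => s1.length + s2.length
decreasing_by all_goals simp_wf <;> omega

def calc_reward_alt (mlpOutput : Int) (agentAction : Int) : Int :=
  let s1 := PySem.List.sorted (PySem.Int.toStr mlpOutput).toList (fun c => c) false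
  let s2 := PySem.List.sorted (PySem.Int.toStr agentAction).toList (fun c => c) false
  let mtch := pvMergeCount s1 s2
  if mtch = 1 then 10
  else if mtch = 2 then 20
  else if mtch = 3 then 100
  else 0

-- ===== PRECONDITION & SPEC =====
def Spec_calc_reward (mlpOutput : Int) (agentAction : Int) (out : Int) : Prop := out = calc_reward_alt mlpOutput agentAction
instance (mlpOutput : Int) (agentAction : Int) (out : Int) : Decidable (Spec_calc_reward mlpOutput agentAction out) := by unfold Spec_calc_reward; infer_instance

-- ===== CLAIM (what is proved, stated in full; the proofs are below) =====
def Claim_equal_calc_reward : Prop := ∀ (mlpOutput : Int) (agentAction : Int), Dom_calc_reward mlpOutput agentAction → Spec_calc_reward mlpOutput agentAction (calc_reward mlpOutput agentAction)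

-- ===== LEMMAS AND PROOFS =====

-- B's merge on two sorted lists computes the multiset-intersection cardinality
theorem pvMergeCount_eq_inter_card : ∀ (s1 s2 : List Char),
    s1.Pairwise (· ≤ ·) → s2.Pairwise (· ≤ ·) →
    pvMergeCount s1 s2 = ((Multiset.ofList s1 ∩ Multiset.ofList s2).card : Int)
  | [], s2, _, _ => by simp [pvMergeCount]
  | a :: s1, [], _, _ => by simp [pvMergeCount]
  | a :: s1, b :: s2, h1, h2 => by
    by_cases hab : a = b
    · subst hab
      have hinter : (Multiset.ofList (a :: s1) ∩ Multiset.ofList (a :: s2))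
          = a ::ₘ (Multiset.ofList s1 ∩ Multiset.ofList s2) := by
        refine Multiset.ext.2 fun c => ?_
        simp [List.count_cons]
      rw [pvMergeCount, if_pos rfl, hinter,
        pvMergeCount_eq_inter_card s1 s2 h1.tail h2.tail]
      simp
      omega
    · by_cases hlt : a < b
      · have hnot : a ∉ (b :: s2) := by
          intro hm
          rcases List.mem_cons.1 hm with h | h
          · exact hab h
          · exact absurd ((List.pairwise_cons.1 h2).1 _ h) (not_le.2 hlt)
        have hz : List.count a (b :: s2) = 0 := List.count_eq_zero.2 hnot
        have hinter : (Multiset.ofList (a :: s1) ∩ Multiset.ofList (b :: s2))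
            = Multiset.ofList s1 ∩ Multiset.ofList (b :: s2) := by
          refine Multiset.ext.2 fun c => ?_
          by_cases hc : c = a
          · subst hc
            simp [hz]
          · have hca : a ≠ c := fun h => hc h.symm
            simp [List.count_cons, hca]
        rw [pvMergeCount, if_neg hab, if_pos hlt, hinter,
          pvMergeCount_eq_inter_card s1 (b :: s2) h1.tail h2]
      · have hbb : b < a := lt_of_le_of_ne (not_lt.1 hlt) (Ne.symm hab)
        have hnot : b ∉ (a :: s1) := by
          intro hm
          rcases List.mem_cons.1 hm with h | h
          · exact hab h.symm
          · exact absurd ((List.pairwise_cons.1 h1).1 _ h) (not_le.2 hbb)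
        have hz : List.count b (a :: s1) = 0 := List.count_eq_zero.2 hnot
        have hinter : (Multiset.ofList (a :: s1) ∩ Multiset.ofList (b :: s2))
            = Multiset.ofList (a :: s1) ∩ Multiset.ofList s2 := by
          refine Multiset.ext.2 fun c => ?_
          by_cases hc : c = b
          · subst hc
            simp [hz]
          · have hcb : b ≠ c := fun h => hc h.symm
            simp [List.count_cons, hcb]
        rw [pvMergeCount, if_neg hab, if_neg hlt, hinter,
          pvMergeCount_eq_inter_card (a :: s1) s2 h1 h2.tail]
termination_by s1 s2 => s1.length + s2.length
decreasing_by all_goals simp_wf <;> omega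

-- a foldl that only adds is a sum
theorem foldl_add_eq_sum (f : Char → Int) : ∀ (l : List Char) (acc : Int),
    l.foldl (fun a i => a + f i) acc = acc + (l.map f).sum
  | [], acc => by simp
  | x :: l, acc => by
    simp [List.foldl_cons, foldl_add_eq_sum f l (acc + f x)]
    ring

-- the multiset-intersection cardinality as a sum of min-counts over the distinct chars of l2
theorem inter_card_eq_sum (l1 l2 : List Char) :
    (Multiset.ofList l1 ∩ Multiset.ofList l2).card
      = ∑ c ∈ l2.toFinset, min (l1.count c) (l2.count c) := by
  have hcount : ∀ c, (Multiset.ofList l1 ∩ Multiset.ofList l2).count c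
      = min (l1.count c) (l2.count c) := fun c => by
    simp
  rw [← Multiset.toFinset_sum_count_eq]
  rw [Finset.sum_congr rfl (fun c _ => hcount c)]
  refine Finset.sum_subset ?_ ?_
  · intro x hx
    have := Multiset.mem_toFinset.1 hx
    have hx2 : x ∈ Multiset.ofList l2 := (Multiset.mem_inter.1 this).2
    exact List.mem_toFinset.2 (by simpa using hx2)
  · intro x _ hnx
    rw [← hcount x]
    exact Multiset.count_eq_zero.2 fun hm => hnx (Multiset.mem_toFinset.2 hm)

-- A's Counter loop computes the same cardinality
theorem counter_loop_eq_inter_card (l1 l2 : List Char) :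
    ((PySem.Dict.counter l2 : PySem.Dict Char Int).keys).foldl
      (fun acc i => if (PySem.Dict.counter l1 : PySem.Dict Char Int).contains i
        then acc + min ((PySem.Dict.counter l1 : PySem.Dict Char Int).getD i 0)
                       ((PySem.Dict.counter l2 : PySem.Dict Char Int).getD i 0)
        else acc) 0
    = ((Multiset.ofList l1 ∩ Multiset.ofList l2).card : Int) := by
  have hfun : (fun (acc : Int) (i : Char) =>
      if (PySem.Dict.counter l1 : PySem.Dict Char Int).contains i
        then acc + min ((PySem.Dict.counter l1 : PySem.Dict Char Int).getD i 0)
                       ((PySem.Dict.counter l2 : PySem.Dict Char Int).getD i 0)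
        else acc)
      = fun acc i => acc + min ((l1.count i : Int)) ((l2.count i : Int)) := by
    funext acc i
    rw [PySem.Dict.contains_counter, PySem.Dict.getD_counter, PySem.Dict.getD_counter]
    by_cases h : i ∈ l1
    · simp [h]
    · have hz : l1.count i = 0 := List.count_eq_zero.2 h
      have hc : l1.contains i = false := by simpa using h
      rw [hc]
      simp [hz]
  rw [PySem.Dict.keys_counter, hfun, foldl_add_eq_sum, zero_add]
  have hnd : (PySem.Set.ofList l2).Nodup := PySem.Set.nodup_ofList l2
  have hfs : (PySem.Set.ofList l2).toFinset = l2.toFinset := by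
    apply Finset.ext
    intro x
    simp [List.mem_toFinset, PySem.Set.mem_ofList]
  rw [← List.sum_toFinset _ hnd, hfs, inter_card_eq_sum l1 l2]
  push_cast
  exact (Finset.sum_congr rfl (fun c _ => rfl))

-- the two match counts agree on arbitrary character lists
theorem mergeCount_sorted_eq (l1 l2 : List Char) :
    pvMergeCount (PySem.List.sorted l1 (fun c => c) false) (PySem.List.sorted l2 (fun c => c) false)
      = ((Multiset.ofList l1 ∩ Multiset.ofList l2).card : Int) := by
  rw [pvMergeCount_eq_inter_card _ _
    (PySem.List.sorted_pairwise l1 (fun c => c)) (PySem.List.sorted_pairwise l2 (fun c => c))]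
  rw [Multiset.coe_eq_coe.2 (PySem.List.sorted_perm l1 (fun c => c) false),
      Multiset.coe_eq_coe.2 (PySem.List.sorted_perm l2 (fun c => c) false)]

-- ===== VERDICT (by name: the statement is the Claim_ definition above) =====
theorem calc_reward_spec : Claim_equal_calc_reward := by
  intro m a _
  unfold Spec_calc_reward
  simp only [calc_reward, calc_reward_alt]
  rw [counter_loop_eq_inter_card, mergeCount_sorted_eq]
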